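-- pv_equiv track=rewrite | github.com/Lcbx/GdScript2All | src/Cpp.py | prettyfy
-- ===== SOURCE A (Python) =====
-- def prettyfy(value):
-- 	def impl():
-- 		cnt = 0
-- 		for c in value:
-- 			if c == '\n':
-- 				cnt += 1
-- 				if cnt < 3: yield c
-- 			elif cnt > 0 and c == ';':
-- 				pass
-- 			elif cnt > 0 and c == '\t':
-- 				yield c
-- 			else:
-- 				cnt = 0
-- 				yield c
-- 	return ''.join(impl())
-- ===== SOURCE B (Python) =====
-- def prettyfy(value):
-- 	# Segment the string into maximal runs starting with '\n' of chars in "\n\t;"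
-- 	# and process each run locally (keep first two newlines, keep tabs, drop
-- 	# semicolons); characters outside runs pass through unchanged.
-- 	out = []
-- 	i = 0
-- 	n = len(value)
-- 	while i < n:
-- 		if value[i] != '\n':
-- 			out.append(value[i])
-- 			i += 1
-- 		else:
-- 			j = i
-- 			while j < n and value[j] in '\n\t;':
-- 				j += 1
-- 			nl = 0
-- 			for ch in value[i:j]:
-- 				if ch == '\n':
-- 					nl += 1
-- 					if nl <= 2:
-- 						out.append(ch)
-- 				elif ch == '\t':
-- 					out.append(ch)
-- 			i = j
-- 	return ''.join(out)
-- ===== Notes on version B (the rewrite author's own statement) =====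
-- stated objective: alternative
-- what changed: Replaces A's global char-by-char counter state machine (a generator threading cnt through every character) with segmentation: B scans for maximal runs matching \n[\n\t;]* and processes each run locally (keep first two newlines, keep tabs, drop semicolons), copying all other characters through unchanged.
import Mathlib
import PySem

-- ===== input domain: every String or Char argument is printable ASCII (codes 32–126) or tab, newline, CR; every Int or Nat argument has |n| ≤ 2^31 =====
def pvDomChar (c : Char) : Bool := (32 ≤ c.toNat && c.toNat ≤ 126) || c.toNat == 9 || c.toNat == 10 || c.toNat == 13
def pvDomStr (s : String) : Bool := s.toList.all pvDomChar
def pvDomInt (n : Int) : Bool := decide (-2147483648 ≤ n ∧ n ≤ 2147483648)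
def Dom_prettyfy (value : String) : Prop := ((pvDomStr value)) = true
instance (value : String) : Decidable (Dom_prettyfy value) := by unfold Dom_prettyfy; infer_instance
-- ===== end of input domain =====

-- B replaces A's global per-character counter state machine with run segmentation
-- (maximal '\n'-led runs of newlines/tabs/semicolons processed locally); same O(n) cost.

-- ===== PORT A =====
-- A's generator loop: structural recursion over the characters with the counter cnt.
def prettyfyAux (cnt : Int) : List Char → List Char
  | [] => []
  | c :: rest =>
    if c = '\n' then
      (if cnt + 1 < 3 then [c] else []) ++ prettyfyAux (cnt + 1) rest
    else if cnt > 0 ∧ c = ';' then prettyfyAux cnt rest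
    else if cnt > 0 ∧ c = '\t' then c :: prettyfyAux cnt rest
    else c :: prettyfyAux 0 rest

def prettyfy (value : String) : String := String.ofList (prettyfyAux 0 value.toList)

-- ===== PORT B =====
-- Source B's run-membership test: value[j] in '\n\t;'
def pvRunChar (c : Char) : Bool := c = '\n' || c = '\t' || c = ';'

-- Source B's inner for-loop over the run value[i:j], with its newline counter nl.
def pvProcRun (nl : Int) : List Char → List Char
  | [] => []
  | c :: rest =>
    if c = '\n' then
      (if nl + 1 ≤ 2 then [c] else []) ++ pvProcRun (nl + 1) rest
    else if c = '\t' then c :: pvProcRun nl rest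
    else pvProcRun nl rest

-- Source B's outer while-loop: copy non-'\n' chars; at a '\n' take the maximal run and process it.
def pvScan : List Char → List Char
  | [] => []
  | c :: rest =>
    if c = '\n' then
      pvProcRun 0 (c :: rest.takeWhile pvRunChar) ++ pvScan (rest.dropWhile pvRunChar)
    else c :: pvScan rest
termination_by l => l.length
decreasing_by
  · exact Nat.lt_succ_of_le (List.length_dropWhile_le _ _)
  · simp

def prettyfy_alt (value : String) : String := String.ofList (pvScan value.toList)

-- ===== PRECONDITION & SPEC =====
def Spec_prettyfy (value : String) (out : String) : Prop := out = prettyfy_alt value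
instance (value : String) (out : String) : Decidable (Spec_prettyfy value out) := by unfold Spec_prettyfy; infer_instance

-- ===== CLAIM (what is proved, stated in full; the proofs are below) =====
def Claim_equal_prettyfy : Prop := ∀ (value : String), Dom_prettyfy value → Spec_prettyfy value (prettyfy value)

-- ===== LEMMAS AND PROOFS =====

-- After a run ends (head is not a run character, or the list is empty), the counter is irrelevant.
lemma prettyfyAux_reset (cnt : Int) (l : List Char)
    (h : ∀ c, l.head? = some c → pvRunChar c = false) :
    prettyfyAux cnt l = prettyfyAux 0 l := by
  cases l with
  | nil => rfl
  | cons c rest =>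
    have hc := h c rfl
    simp only [pvRunChar, Bool.or_eq_false_iff, decide_eq_false_iff_not] at hc
    simp [prettyfyAux, hc.1.1, hc.1.2, hc.2]

lemma head_dropWhile_false (p : Char → Bool) :
    ∀ l : List Char, ∀ c, (l.dropWhile p).head? = some c → p c = false := by
  intro l
  induction l with
  | nil => intro c h; simp [List.dropWhile] at h
  | cons a t ih =>
    intro c h
    rw [List.dropWhile_cons] at h
    by_cases ha : p a = true
    · rw [if_pos ha] at h; exact ih c h
    · rw [if_neg ha] at h
      simp only [List.head?_cons, Option.some.injEq] at h
      simp only [Bool.not_eq_true] at ha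
      rw [← h]; exact ha

-- Inside a run (all characters are run characters, positive counter), A's state machine
-- computes exactly B's local run processing followed by A restarted on the remainder.
lemma run_lemma :
    ∀ (l : List Char), (∀ c ∈ l, pvRunChar c = true) →
    ∀ (cnt : Int) (rest : List Char), 0 < cnt →
    (∀ c, rest.head? = some c → pvRunChar c = false) →
    prettyfyAux cnt (l ++ rest) = pvProcRun cnt l ++ prettyfyAux 0 rest := by
  intro l
  induction l with
  | nil =>
    intro _ cnt rest _ hrest
    simpa [pvProcRun] using prettyfyAux_reset cnt rest hrest
  | cons c t ih =>
    intro hall cnt rest hcnt hrest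
    have hc : pvRunChar c = true := hall c (List.mem_cons_self ..)
    have ht : ∀ x ∈ t, pvRunChar x = true := fun x hx => hall x (List.mem_cons_of_mem _ hx)
    simp only [pvRunChar, Bool.or_eq_true, decide_eq_true_eq] at hc
    rcases hc with (hn | htb) | hs
    · -- c = '\n'
      subst hn
      have hrec := ih ht (cnt + 1) rest (by omega) hrest
      have hcond : (cnt + 1 < 3) = (cnt + 1 ≤ 2) := by
        apply propext; omega
      simp [prettyfyAux, pvProcRun, hrec, hcond]
    · -- c = '\t'
      subst htb
      have hrec := ih ht cnt rest hcnt hrest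
      simp [prettyfyAux, pvProcRun, hcnt, hrec]
    · -- c = ';'
      subst hs
      have hrec := ih ht cnt rest hcnt hrest
      simp [prettyfyAux, pvProcRun, hcnt, hrec]

lemma main_lemma : ∀ l : List Char, prettyfyAux 0 l = pvScan l := by
  intro l
  induction l using pvScan.induct with
  | case1 => simp [prettyfyAux, pvScan]
  | case2 rest ih =>
    have hsplit : rest = rest.takeWhile pvRunChar ++ rest.dropWhile pvRunChar :=
      (List.takeWhile_append_dropWhile).symm
    have hall : ∀ x ∈ rest.takeWhile pvRunChar, pvRunChar x = true :=
      fun x hx => List.mem_takeWhile_imp hx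
    have hdrop : ∀ x, (rest.dropWhile pvRunChar).head? = some x → pvRunChar x = false :=
      head_dropWhile_false pvRunChar rest
    have hrun := run_lemma (rest.takeWhile pvRunChar) hall 1
      (rest.dropWhile pvRunChar) (by omega) hdrop
    calc prettyfyAux 0 ('\n' :: rest)
        = '\n' :: prettyfyAux 1 rest := by simp [prettyfyAux]
      _ = '\n' :: prettyfyAux 1 (rest.takeWhile pvRunChar ++ rest.dropWhile pvRunChar) := by
            rw [← hsplit]
      _ = '\n' :: (pvProcRun 1 (rest.takeWhile pvRunChar) ++ prettyfyAux 0 (rest.dropWhile pvRunChar)) := by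
            rw [hrun]
      _ = '\n' :: (pvProcRun 1 (rest.takeWhile pvRunChar) ++ pvScan (rest.dropWhile pvRunChar)) := by
            rw [ih]
      _ = pvScan ('\n' :: rest) := by
            simp [pvScan, pvProcRun]
  | case3 c rest hnl ih =>
    by_cases hsemi : c = ';'
    · subst hsemi
      simp [prettyfyAux, pvScan, ih]
    · by_cases htab : c = '\t'
      · subst htab
        simp [prettyfyAux, pvScan, ih]
      · simp [prettyfyAux, pvScan, hnl, hsemi, htab, ih]

-- ===== VERDICT (by name: the statement is the Claim_ definition above) =====
theorem prettyfy_spec : Claim_equal_prettyfy := by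
  intro value _
  unfold Spec_prettyfy prettyfy prettyfy_alt
  exact congrArg String.ofList (main_lemma value.toList)
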